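-- pv_equiv track=rewrite | github.com/mjang99/Keyword_Generator | src/evidence/service.py | _is_thin_pack
-- ===== SOURCE A (Python) =====
-- from typing import Any
--
-- COMMERCE_PAGE_CLASSES = {
--     "commerce_pdp",
--     "image_heavy_commerce_pdp",
--     "marketing_only_pdp",
--     "product_marketing_page",
-- }
--
-- def _is_thin_pack(facts: list[dict[str, Any]], page_class: str) -> bool:
--     if page_class not in COMMERCE_PAGE_CLASSES:
--         return False
--
--     base_types = {"product_name", "brand", "product_category"}
--     present_base = {str(fact.get("type")) for fact in facts if str(fact.get("type")) in base_types}
--     if len(present_base) < len(base_types):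
--         return True
--
--     rich_types = {
--         str(fact.get("type"))
--         for fact in facts
--         if str(fact.get("type"))
--         in {"benefit", "key_ingredient", "usage", "use_case", "problem_solution", "volume", "variant", "texture", "audience"}
--     }
--     return len(rich_types) < 2
-- ===== SOURCE B (Python) =====
-- COMMERCE_PAGE_CLASSES = {
--     "commerce_pdp",
--     "image_heavy_commerce_pdp",
--     "marketing_only_pdp",
--     "product_marketing_page",
-- }
--
-- RICH_TYPES = (
--     "benefit", "key_ingredient", "usage", "use_case", "problem_solution",
--     "volume", "variant", "texture", "audience",
-- )
--
--
-- def _is_thin_pack(facts, page_class):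
--     if page_class not in COMMERCE_PAGE_CLASSES:
--         return False
--     has_name = has_brand = has_cat = False
--     rich_seen = []
--     for fact in facts:
--         t = str(fact.get("type"))
--         if t == "product_name":
--             has_name = True
--         elif t == "brand":
--             has_brand = True
--         elif t == "product_category":
--             has_cat = True
--         elif t in RICH_TYPES and t not in rich_seen:
--             rich_seen.append(t)
--         if has_name and has_brand and has_cat and len(rich_seen) >= 2:
--             return False
--     return True
-- ===== Notes on version B (the rewrite author's own statement) =====
-- stated objective: alternative
-- what changed: B replaces A's two filtered set comprehensions with one explicit single pass over facts maintaining three base-type flags and a capped list of distinct rich types, returning False early as soon as the pack is provably not thin.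
import Mathlib
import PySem

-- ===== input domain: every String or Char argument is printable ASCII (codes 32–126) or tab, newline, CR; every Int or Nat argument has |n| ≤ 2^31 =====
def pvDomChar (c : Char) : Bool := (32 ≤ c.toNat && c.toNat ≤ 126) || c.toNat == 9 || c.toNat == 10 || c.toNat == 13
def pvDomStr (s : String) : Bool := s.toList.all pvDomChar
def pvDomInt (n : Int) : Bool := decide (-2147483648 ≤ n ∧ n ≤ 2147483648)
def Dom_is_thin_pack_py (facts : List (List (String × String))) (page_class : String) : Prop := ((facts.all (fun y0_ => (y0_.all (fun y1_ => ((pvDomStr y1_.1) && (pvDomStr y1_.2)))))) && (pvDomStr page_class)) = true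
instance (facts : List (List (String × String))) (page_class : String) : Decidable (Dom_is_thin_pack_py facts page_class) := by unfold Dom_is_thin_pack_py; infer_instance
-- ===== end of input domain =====

-- B answers the same question with one explicit pass holding three base-type flags and a list of
-- distinct rich types (early exit once the pack is provably not thin), instead of A's two
-- filtered set comprehensions; return values are identical.

-- ===== PORT A =====
-- str(fact.get("type")): dict lookup (first match), None stringifies to "None"
def factTypeStr (fact : List (String × String)) : String :=
  match (PySem.Dict.mk fact).get? "type" with
  | some v => v
  | none => "None"

def commercePageClasses : PySem.Set String :=
  PySem.Set.ofList ["commerce_pdp", "image_heavy_commerce_pdp", "marketing_only_pdp", "product_marketing_page"]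

def is_thin_pack_py (facts : List (List (String × String))) (page_class : String) : Bool :=
  if ¬ (PySem.Set.contains commercePageClasses page_class) then false
  else
    let base_types : PySem.Set String := PySem.Set.ofList ["product_name", "brand", "product_category"]
    let present_base : PySem.Set String :=
      PySem.Set.ofList ((facts.filter (fun fact => PySem.Set.contains base_types (factTypeStr fact))).map factTypeStr)
    if PySem.Set.len present_base < PySem.Set.len base_types then true
    else
      let rich_set : PySem.Set String :=
        PySem.Set.ofList ["benefit", "key_ingredient", "usage", "use_case", "problem_solution", "volume", "variant", "texture", "audience"]
      let rich_types : PySem.Set String :=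
        PySem.Set.ofList ((facts.filter (fun fact => PySem.Set.contains rich_set (factTypeStr fact))).map factTypeStr)
      decide (PySem.Set.len rich_types < 2)

-- ===== PORT B =====
-- the RICH_TYPES tuple of Source B
def richList : List String :=
  ["benefit", "key_ingredient", "usage", "use_case", "problem_solution", "volume", "variant", "texture", "audience"]

-- the loop body of Source B: the if/elif chain updating (has_name, has_brand, has_cat, rich_seen)
def stepUpdate (fact : List (String × String)) (hn hb hc : Bool) (rs : List String) :
    Bool × Bool × Bool × List String :=
  let t := factTypeStr fact
  if t = "product_name" then (true, hb, hc, rs)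
  else if t = "brand" then (hn, true, hc, rs)
  else if t = "product_category" then (hn, hb, true, rs)
  else if t ∈ richList ∧ t ∉ rs then (hn, hb, hc, rs ++ [t])
  else (hn, hb, hc, rs)

-- the early-return test of Source B
def exitCond (st : Bool × Bool × Bool × List String) : Bool :=
  st.1 && st.2.1 && st.2.2.1 && decide (2 ≤ st.2.2.2.length)

-- the for-loop of Source B with its early `return False`
def altLoop : List (List (String × String)) → Bool → Bool → Bool → List String → Bool
  | [], _, _, _, _ => true
  | fact :: rest, hn, hb, hc, rs =>
    let st := stepUpdate fact hn hb hc rs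
    if exitCond st then false
    else altLoop rest st.1 st.2.1 st.2.2.1 st.2.2.2

def is_thin_pack_py_alt (facts : List (List (String × String))) (page_class : String) : Bool :=
  if ¬ (PySem.Set.contains commercePageClasses page_class) then false
  else altLoop facts false false false []

-- ===== PRECONDITION & SPEC =====
def Spec_is_thin_pack_py (facts : List (List (String × String))) (page_class : String) (out : Bool) : Prop := out = is_thin_pack_py_alt facts page_class
instance (facts : List (List (String × String))) (page_class : String) (out : Bool) : Decidable (Spec_is_thin_pack_py facts page_class out) := by unfold Spec_is_thin_pack_py; infer_instance

-- ===== CLAIM (what is proved, stated in full; the proofs are below) =====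
def Claim_equal_is_thin_pack_py : Prop := ∀ (facts : List (List (String × String))) (page_class : String), Dom_is_thin_pack_py facts page_class → Spec_is_thin_pack_py facts page_class (is_thin_pack_py facts page_class)

-- ===== LEMMAS AND PROOFS =====

-- the loop of B without the early exit, returning the final state
def runState : List (List (String × String)) → Bool → Bool → Bool → List String →
    Bool × Bool × Bool × List String
  | [], hn, hb, hc, rs => (hn, hb, hc, rs)
  | fact :: rest, hn, hb, hc, rs =>
    let st := stepUpdate fact hn hb hc rs
    runState rest st.1 st.2.1 st.2.2.1 st.2.2.2

-- case equations for one loop step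
lemma stepUpdate_eq_name (fact : List (String × String)) (hn hb hc : Bool) (rs : List String)
    (h : factTypeStr fact = "product_name") :
    stepUpdate fact hn hb hc rs = (true, hb, hc, rs) := by
  simp [stepUpdate, h]

lemma stepUpdate_eq_brand (fact : List (String × String)) (hn hb hc : Bool) (rs : List String)
    (h1 : ¬ factTypeStr fact = "product_name") (h2 : factTypeStr fact = "brand") :
    stepUpdate fact hn hb hc rs = (hn, true, hc, rs) := by
  simp [stepUpdate, h2]

lemma stepUpdate_eq_cat (fact : List (String × String)) (hn hb hc : Bool) (rs : List String)
    (h1 : ¬ factTypeStr fact = "product_name") (h2 : ¬ factTypeStr fact = "brand")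
    (h3 : factTypeStr fact = "product_category") :
    stepUpdate fact hn hb hc rs = (hn, hb, true, rs) := by
  simp [stepUpdate, h3]

lemma stepUpdate_eq_rich (fact : List (String × String)) (hn hb hc : Bool) (rs : List String)
    (h1 : ¬ factTypeStr fact = "product_name") (h2 : ¬ factTypeStr fact = "brand")
    (h3 : ¬ factTypeStr fact = "product_category")
    (h4 : factTypeStr fact ∈ richList ∧ factTypeStr fact ∉ rs) :
    stepUpdate fact hn hb hc rs = (hn, hb, hc, rs ++ [factTypeStr fact]) := by
  simp [stepUpdate, h1, h2, h3, h4.1, h4.2]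

lemma stepUpdate_eq_other (fact : List (String × String)) (hn hb hc : Bool) (rs : List String)
    (h1 : ¬ factTypeStr fact = "product_name") (h2 : ¬ factTypeStr fact = "brand")
    (h3 : ¬ factTypeStr fact = "product_category")
    (h4 : ¬ (factTypeStr fact ∈ richList ∧ factTypeStr fact ∉ rs)) :
    stepUpdate fact hn hb hc rs = (hn, hb, hc, rs) := by
  simp only [stepUpdate, h1, h2, h3, h4, if_false]

-- one step never clears a flag and never shortens the accumulator
lemma stepUpdate_mono (fact : List (String × String)) (hn hb hc : Bool) (rs : List String) :
    (hn = true → (stepUpdate fact hn hb hc rs).1 = true) ∧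
    (hb = true → (stepUpdate fact hn hb hc rs).2.1 = true) ∧
    (hc = true → (stepUpdate fact hn hb hc rs).2.2.1 = true) ∧
    rs.length ≤ (stepUpdate fact hn hb hc rs).2.2.2.length := by
  by_cases h1 : factTypeStr fact = "product_name"
  · rw [stepUpdate_eq_name fact hn hb hc rs h1]; simp
  · by_cases h2 : factTypeStr fact = "brand"
    · rw [stepUpdate_eq_brand fact hn hb hc rs h1 h2]; simp
    · by_cases h3 : factTypeStr fact = "product_category"
      · rw [stepUpdate_eq_cat fact hn hb hc rs h1 h2 h3]; simp
      · by_cases h4 : factTypeStr fact ∈ richList ∧ factTypeStr fact ∉ rs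
        · rw [stepUpdate_eq_rich fact hn hb hc rs h1 h2 h3 h4]; simp
        · rw [stepUpdate_eq_other fact hn hb hc rs h1 h2 h3 h4]; simp

-- nor does the whole loop
lemma runState_mono (facts : List (List (String × String))) :
    ∀ (hn hb hc : Bool) (rs : List String),
      (hn = true → (runState facts hn hb hc rs).1 = true) ∧
      (hb = true → (runState facts hn hb hc rs).2.1 = true) ∧
      (hc = true → (runState facts hn hb hc rs).2.2.1 = true) ∧
      rs.length ≤ (runState facts hn hb hc rs).2.2.2.length := by
  induction facts with
  | nil => intro hn hb hc rs; simp [runState]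
  | cons fact rest ih =>
    intro hn hb hc rs
    obtain ⟨s1, s2, s3, s4⟩ := stepUpdate_mono fact hn hb hc rs
    obtain ⟨i1, i2, i3, i4⟩ := ih (stepUpdate fact hn hb hc rs).1 (stepUpdate fact hn hb hc rs).2.1
      (stepUpdate fact hn hb hc rs).2.2.1 (stepUpdate fact hn hb hc rs).2.2.2
    exact ⟨fun h => i1 (s1 h), fun h => i2 (s2 h), fun h => i3 (s3 h), le_trans s4 i4⟩

-- once the exit condition holds it holds of the final state too
lemma cond_mono (facts : List (List (String × String))) (st : Bool × Bool × Bool × List String)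
    (h : exitCond st = true) :
    exitCond (runState facts st.1 st.2.1 st.2.2.1 st.2.2.2) = true := by
  simp only [exitCond, Bool.and_eq_true, decide_eq_true_eq] at h
  obtain ⟨⟨⟨h1, h2⟩, h3⟩, h4⟩ := h
  have m := runState_mono facts st.1 st.2.1 st.2.2.1 st.2.2.2
  simp only [exitCond, Bool.and_eq_true, decide_eq_true_eq]
  exact ⟨⟨⟨m.1 h1, m.2.1 h2⟩, m.2.2.1 h3⟩, le_trans h4 m.2.2.2⟩

-- early-exit loop = condition on the final state of the exit-free loop
-- (needs the condition false at entry, as it is at the loop's start in Source B)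
lemma altLoop_eq_runState (facts : List (List (String × String))) :
    ∀ (hn hb hc : Bool) (rs : List String),
      exitCond (hn, hb, hc, rs) = false →
      altLoop facts hn hb hc rs = ! exitCond (runState facts hn hb hc rs) := by
  induction facts with
  | nil =>
    intro hn hb hc rs h0
    simp [altLoop, runState, h0]
  | cons fact rest ih =>
    intro hn hb hc rs h0
    simp only [altLoop, runState]
    by_cases h : exitCond (stepUpdate fact hn hb hc rs) = true
    · rw [if_pos h, cond_mono rest (stepUpdate fact hn hb hc rs) h]
      rfl
    · rw [if_neg h]
      exact ih _ _ _ _ (Bool.eq_false_iff.mpr h)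

-- final flags = initial flag OR a fact of that type occurs
lemma runState_flags (facts : List (List (String × String))) :
    ∀ (hn hb hc : Bool) (rs : List String),
      (runState facts hn hb hc rs).1 = (hn || facts.any (fun f => factTypeStr f = "product_name")) ∧
      (runState facts hn hb hc rs).2.1 = (hb || facts.any (fun f => factTypeStr f = "brand")) ∧
      (runState facts hn hb hc rs).2.2.1 = (hc || facts.any (fun f => factTypeStr f = "product_category")) := by
  induction facts with
  | nil => intro hn hb hc rs; simp [runState]
  | cons fact rest ih =>
    intro hn hb hc rs
    simp only [runState, List.any_cons]
    by_cases h1 : factTypeStr fact = "product_name"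
    · rw [stepUpdate_eq_name fact hn hb hc rs h1]
      obtain ⟨i1, i2, i3⟩ := ih true hb hc rs
      exact ⟨by simp [i1, h1], by simp [i2, h1], by simp [i3, h1]⟩
    · by_cases h2 : factTypeStr fact = "brand"
      · rw [stepUpdate_eq_brand fact hn hb hc rs h1 h2]
        obtain ⟨i1, i2, i3⟩ := ih hn true hc rs
        exact ⟨by simp [i1, h2], by simp [i2, h2], by simp [i3, h2]⟩
      · by_cases h3 : factTypeStr fact = "product_category"
        · rw [stepUpdate_eq_cat fact hn hb hc rs h1 h2 h3]
          obtain ⟨i1, i2, i3⟩ := ih hn hb true rs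
          exact ⟨by simp [i1, h3], by simp [i2, h3], by simp [i3, h3]⟩
        · by_cases h4 : factTypeStr fact ∈ richList ∧ factTypeStr fact ∉ rs
          · rw [stepUpdate_eq_rich fact hn hb hc rs h1 h2 h3 h4]
            obtain ⟨i1, i2, i3⟩ := ih hn hb hc (rs ++ [factTypeStr fact])
            exact ⟨by simp [i1, h1], by simp [i2, h2], by simp [i3, h3]⟩
          · rw [stepUpdate_eq_other fact hn hb hc rs h1 h2 h3 h4]
            obtain ⟨i1, i2, i3⟩ := ih hn hb hc rs
            exact ⟨by simp [i1, h1], by simp [i2, h2], by simp [i3, h3]⟩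

-- members of the final rich accumulator, and its nodup-ness
lemma runState_rich (facts : List (List (String × String))) :
    ∀ (hn hb hc : Bool) (rs : List String), rs.Nodup →
      (runState facts hn hb hc rs).2.2.2.Nodup ∧
      ∀ x, x ∈ (runState facts hn hb hc rs).2.2.2 ↔
        x ∈ rs ∨ (x ∈ richList ∧ ∃ f ∈ facts, factTypeStr f = x) := by
  induction facts with
  | nil => intro hn hb hc rs hnd; simp [runState, hnd]
  | cons fact rest ih =>
    intro hn hb hc rs hnd
    simp only [runState]
    by_cases h1 : factTypeStr fact = "product_name"
    · rw [stepUpdate_eq_name fact hn hb hc rs h1]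
      obtain ⟨ind, imem⟩ := ih true hb hc rs hnd
      refine ⟨ind, fun x => ?_⟩
      rw [imem x]
      simp only [List.mem_cons]
      constructor
      · rintro (h | ⟨hr, f, hf, rfl⟩)
        · exact Or.inl h
        · exact Or.inr ⟨hr, f, Or.inr hf, rfl⟩
      · rintro (h | ⟨hr, f, (rfl | hf), rfl⟩)
        · exact Or.inl h
        · exact absurd hr (by rw [h1]; decide)
        · exact Or.inr ⟨hr, f, hf, rfl⟩
    · by_cases h2 : factTypeStr fact = "brand"
      · rw [stepUpdate_eq_brand fact hn hb hc rs h1 h2]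
        obtain ⟨ind, imem⟩ := ih hn true hc rs hnd
        refine ⟨ind, fun x => ?_⟩
        rw [imem x]
        simp only [List.mem_cons]
        constructor
        · rintro (h | ⟨hr, f, hf, rfl⟩)
          · exact Or.inl h
          · exact Or.inr ⟨hr, f, Or.inr hf, rfl⟩
        · rintro (h | ⟨hr, f, (rfl | hf), rfl⟩)
          · exact Or.inl h
          · exact absurd hr (by rw [h2]; decide)
          · exact Or.inr ⟨hr, f, hf, rfl⟩
      · by_cases h3 : factTypeStr fact = "product_category"
        · rw [stepUpdate_eq_cat fact hn hb hc rs h1 h2 h3]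
          obtain ⟨ind, imem⟩ := ih hn hb true rs hnd
          refine ⟨ind, fun x => ?_⟩
          rw [imem x]
          simp only [List.mem_cons]
          constructor
          · rintro (h | ⟨hr, f, hf, rfl⟩)
            · exact Or.inl h
            · exact Or.inr ⟨hr, f, Or.inr hf, rfl⟩
          · rintro (h | ⟨hr, f, (rfl | hf), rfl⟩)
            · exact Or.inl h
            · exact absurd hr (by rw [h3]; decide)
            · exact Or.inr ⟨hr, f, hf, rfl⟩
        · by_cases h4 : factTypeStr fact ∈ richList ∧ factTypeStr fact ∉ rs
          · rw [stepUpdate_eq_rich fact hn hb hc rs h1 h2 h3 h4]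
            have hnd' : (rs ++ [factTypeStr fact]).Nodup :=
              List.Nodup.append hnd (List.nodup_singleton _)
                (fun a ha hb => h4.2 ((List.mem_singleton.mp hb) ▸ ha))
            obtain ⟨ind, imem⟩ := ih hn hb hc (rs ++ [factTypeStr fact]) hnd'
            refine ⟨ind, fun x => ?_⟩
            rw [imem x]
            simp only [List.mem_append, List.mem_cons]
            constructor
            · rintro ((h | hone) | ⟨hr, f, hf, rfl⟩)
              · exact Or.inl h
              · rcases hone with rfl | h0
                · exact Or.inr ⟨h4.1, fact, Or.inl rfl, rfl⟩
                · exact absurd h0 (List.not_mem_nil)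
              · exact Or.inr ⟨hr, f, Or.inr hf, rfl⟩
            · rintro (h | ⟨hr, f, (rfl | hf), rfl⟩)
              · exact Or.inl (Or.inl h)
              · exact Or.inl (Or.inr (Or.inl rfl))
              · exact Or.inr ⟨hr, f, hf, rfl⟩
          · rw [stepUpdate_eq_other fact hn hb hc rs h1 h2 h3 h4]
            obtain ⟨ind, imem⟩ := ih hn hb hc rs hnd
            refine ⟨ind, fun x => ?_⟩
            rw [imem x]
            simp only [List.mem_cons]
            constructor
            · rintro (h | ⟨hr, f, hf, rfl⟩)
              · exact Or.inl h
              · exact Or.inr ⟨hr, f, Or.inr hf, rfl⟩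
            · rintro (h | ⟨hr, f, (rfl | hf), rfl⟩)
              · exact Or.inl h
              · -- the fact's own type: it must already be in rs (it is rich, hence not base)
                left
                by_contra hts
                exact h4 ⟨hr, hts⟩
              · exact Or.inr ⟨hr, f, hf, rfl⟩

-- membership in a comprehension-set filtered by membership in a fixed list `cs`
lemma mem_filtered_types (facts : List (List (String × String))) (cs : List String) (x : String) :
    x ∈ PySem.Set.ofList ((facts.filter (fun fact => PySem.Set.contains (PySem.Set.ofList cs) (factTypeStr fact))).map factTypeStr)
      ↔ (∃ f ∈ facts, factTypeStr f = x) ∧ x ∈ cs := by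
  simp only [PySem.Set.mem_ofList, List.mem_map, List.mem_filter]
  constructor
  · rintro ⟨f, ⟨hf, hc⟩, rfl⟩
    have := (PySem.Set.contains_iff _ _).mp hc
    exact ⟨⟨f, hf, rfl⟩, by simpa [PySem.Set.mem_ofList] using this⟩
  · rintro ⟨⟨f, hf, rfl⟩, hx⟩
    exact ⟨f, ⟨hf, (PySem.Set.contains_iff _ _).mpr (by simpa [PySem.Set.mem_ofList] using hx)⟩, rfl⟩

theorem is_thin_pack_py_equal (facts : List (List (String × String))) (page_class : String) :
    is_thin_pack_py facts page_class = is_thin_pack_py_alt facts page_class := by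
  unfold is_thin_pack_py is_thin_pack_py_alt
  by_cases hpc : PySem.Set.contains commercePageClasses page_class
  · simp only [hpc, not_true, ite_false]
    rw [altLoop_eq_runState facts false false false [] (by rfl)]
    obtain ⟨f1, f2, f3⟩ := runState_flags facts false false false []
    obtain ⟨rnd, rmem⟩ := runState_rich facts false false false [] (by simp)
    set baseL : List String := ["product_name", "brand", "product_category"] with hbase
    have hbnd : baseL.Nodup := by rw [hbase]; decide
    set P : List String :=
      PySem.Set.ofList ((facts.filter (fun fact => PySem.Set.contains (PySem.Set.ofList baseL) (factTypeStr fact))).map factTypeStr) with hP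
    have hPnd : P.Nodup := PySem.Set.nodup_ofList _
    have hPmem : ∀ x, x ∈ P ↔ (∃ f ∈ facts, factTypeStr f = x) ∧ x ∈ baseL :=
      fun x => mem_filtered_types facts baseL x
    by_cases hsub : ∀ x ∈ baseL, ∃ f ∈ facts, factTypeStr f = x
    · -- all base types occur: A's first guard fails, B's three flags are true
      have hPb : ∀ x, x ∈ P ↔ x ∈ baseL := by
        intro x; rw [hPmem x]
        exact ⟨fun h => h.2, fun h => ⟨hsub x h, h⟩⟩
      have hperm : P.Perm baseL := (List.perm_ext_iff_of_nodup hPnd hbnd).mpr hPb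
      have hnlt : ¬ (PySem.Set.len P < PySem.Set.len (PySem.Set.ofList baseL)) := by
        have : PySem.Set.ofList baseL = baseL := PySem.Set.ofList_eq_self_of_nodup _ hbnd
        simp [PySem.Set.len, this, hperm.length_eq]
      have hany : ∀ b, b ∈ baseL → facts.any (fun f => factTypeStr f = b) = true := by
        intro b hb
        obtain ⟨f, hf, hfb⟩ := hsub b hb
        exact List.any_eq_true.mpr ⟨f, hf, by simp [hfb]⟩
      have e1 : (runState facts false false false []).1 = true := by
        rw [f1, hany "product_name" (by rw [hbase]; decide)]; rfl
      have e2 : (runState facts false false false []).2.1 = true := by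
        rw [f2, hany "brand" (by rw [hbase]; decide)]; rfl
      have e3 : (runState facts false false false []).2.2.1 = true := by
        rw [f3, hany "product_category" (by rw [hbase]; decide)]; rfl
      simp only [hnlt, if_false, exitCond, e1, e2, e3, Bool.true_and]
      -- rich branch: A's rich set and B's accumulator have the same members, hence the same length
      set RA : List String :=
        PySem.Set.ofList ((facts.filter (fun fact => PySem.Set.contains (PySem.Set.ofList ["benefit", "key_ingredient", "usage", "use_case", "problem_solution", "volume", "variant", "texture", "audience"]) (factTypeStr fact))).map factTypeStr) with hRA
      have hRAmem : ∀ x, x ∈ RA ↔ (∃ f ∈ facts, factTypeStr f = x) ∧ x ∈ richList :=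
        fun x => mem_filtered_types facts richList x
      have hperm2 : RA.Perm (runState facts false false false []).2.2.2 :=
        (List.perm_ext_iff_of_nodup (PySem.Set.nodup_ofList _) rnd).mpr
          (fun x => by rw [hRAmem x, rmem x]; simp [and_comm])
      have hlen2 := hperm2.length_eq
      simp only [PySem.Set.len]
      rw [← hlen2]
      by_cases h2 : RA.length < 2
      · simp [Nat.not_le.mpr h2]; omega
      · simp [Nat.not_lt.mp h2]; omega
    · -- some base type missing: A's first guard fires, B's flag conjunction is false
      push Not at hsub
      obtain ⟨b0, hb0, hb0T⟩ := hsub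
      have hPsub : P ⊆ baseL.erase b0 := by
        intro x hx
        rcases (hPmem x).mp hx with ⟨hxT, hxb⟩
        refine (List.mem_erase_of_ne ?_).mpr hxb
        rintro rfl
        obtain ⟨f, hf, hfx⟩ := hxT
        exact hb0T f hf hfx
      have hle : P.length ≤ (baseL.erase b0).length :=
        (List.subperm_of_subset hPnd hPsub).length_le
      have herase : (baseL.erase b0).length = 2 := by
        have := List.length_erase_of_mem hb0
        simp [hbase] at this ⊢
        omega
      have hlt : PySem.Set.len P < PySem.Set.len (PySem.Set.ofList baseL) := by
        have : PySem.Set.ofList baseL = baseL := PySem.Set.ofList_eq_self_of_nodup _ hbnd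
        simp only [PySem.Set.len, this]
        simp [hbase]
        omega
      have hanyb : facts.any (fun f => factTypeStr f = b0) = false := by
        rw [List.any_eq_false]
        intro f hf
        simp only [decide_eq_true_eq]
        exact fun h => hb0T f hf h
      have hflag : exitCond (runState facts false false false []) = false := by
        simp only [exitCond]
        rw [hbase] at hb0
        fin_cases hb0
        · rw [f1] at *; simp [hanyb]
        · rw [f2] at *; simp [hanyb]
        · rw [f3] at *; simp [hanyb]
      rw [hflag, if_pos hlt]
      rfl
  · have hnm : page_class ∉ commercePageClasses := fun h => hpc ((PySem.Set.contains_iff _ _).mpr h)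
    simp [hnm]

-- ===== VERDICT (by name: the statement is the Claim_ definition above) =====
theorem is_thin_pack_py_spec : Claim_equal_is_thin_pack_py := by
  intro facts page_class _
  unfold Spec_is_thin_pack_py
  exact is_thin_pack_py_equal facts page_class
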